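-- pv_equiv track=rewrite | github.com/Blankvillein/dumpster-diver | stubtables.py | make_user_table_by_year
-- ===== SOURCE A (Python) =====
-- def make_user_table_by_year(yearbands,
--                             title="EN Wikipedians by year who made "
--                                   "''n'' edits in their first year"):
--     """Generate wikitable of user-year data.
--
--     Parameters
--     ----------
--     yearbands: dict
--         Dict of ((year, bandlabel),count) pairs
--     title : str
--         Desired title of table
--
--     Returns
--     -------
--     str
--     Returns wikitable with user-bands as columns
--     and years as rows.
--     If neither 'users' nor 'yearbands' is provided,
--     a blank string is returned.
--     """
--     bands = sorted(yearbands.keys())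
--     table = "{|class=wikitable"
--     table += """
-- |+{}
-- |Year
-- |1-9 edits
-- |10-99 edits
-- |100-999 edits
-- |1,000-9,999 edits
-- |10,000+ edits
-- """.format(title)
--     years = sorted(set([x[0] for x in bands]))
--     for y in years:
--         bands_in_year = [x for x in bands if x[0] == y]
--         row = "|-\n|" + y
--         for b in bands_in_year:
--             count = yearbands[b]
--             row += "\n|{}".format(count)
--         row += "\n"
--         table += row
--     table += "|}"
--     return table
-- ===== SOURCE B (Python) =====
-- def make_user_table_by_year(yearbands,
--                             title="EN Wikipedians by year who made "
--                                   "''n'' edits in their first year"):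
--     """Single pass: group counts of the sorted band keys by year with a
--     dict of lists, then emit one row per group (no per-year rescan)."""
--     groups = {}
--     for key in sorted(yearbands):
--         groups.setdefault(key[0], []).append(yearbands[key])
--     body = "".join(
--         "|-\n|" + y + "".join("\n|{}".format(c) for c in counts) + "\n"
--         for y, counts in groups.items())
--     return ("{|class=wikitable"
--             + "\n|+" + title
--             + "\n|Year\n|1-9 edits\n|10-99 edits\n|100-999 edits\n"
--               "|1,000-9,999 edits\n|10,000+ edits\n"
--             + body + "|}")
-- ===== Notes on version B (the rewrite author's own statement) =====
-- stated objective: faster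
-- what changed: Instead of computing the sorted distinct year list and rescanning the whole sorted key list once per year, B makes a single pass over the sorted keys grouping counts per year in a dict of lists and then emits one row per group.
import Mathlib
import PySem

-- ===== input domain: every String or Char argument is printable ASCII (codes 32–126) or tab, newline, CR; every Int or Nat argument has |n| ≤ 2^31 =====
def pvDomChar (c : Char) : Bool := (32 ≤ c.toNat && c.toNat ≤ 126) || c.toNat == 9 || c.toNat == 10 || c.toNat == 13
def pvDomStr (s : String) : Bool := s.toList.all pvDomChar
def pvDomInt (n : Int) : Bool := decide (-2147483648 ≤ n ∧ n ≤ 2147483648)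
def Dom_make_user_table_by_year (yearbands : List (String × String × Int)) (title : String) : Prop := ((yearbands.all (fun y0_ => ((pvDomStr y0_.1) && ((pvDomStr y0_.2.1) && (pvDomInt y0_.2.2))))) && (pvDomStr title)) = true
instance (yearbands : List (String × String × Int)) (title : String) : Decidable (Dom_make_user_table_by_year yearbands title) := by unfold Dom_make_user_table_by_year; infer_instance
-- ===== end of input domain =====

-- B replaces A's per-year rescan of the sorted key list by one grouping pass
-- over the sorted keys (dict of year -> list of counts); objective: faster.

-- ===== PORT A =====
def make_user_table_by_year (yearbands : List (String × String × Int)) (title : String) : String :=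
  let d : PySem.Dict (String × String) Int :=
    PySem.Dict.ofList (yearbands.map (fun p => ((p.1, p.2.1), p.2.2)))
  let bands := PySem.List.sorted2 d.keys (fun k => k.1) (fun k => k.2)
  let table := "{|class=wikitable"
  let table := table ++ ("\n|+" ++ title ++ "\n|Year\n|1-9 edits\n|10-99 edits\n|100-999 edits\n|1,000-9,999 edits\n|10,000+ edits\n")
  let years := PySem.List.sorted (PySem.Set.ofList (bands.map (fun x => x.1))) (fun x => x)
  let table := years.foldl (fun t y =>
    let bands_in_year := bands.filter (fun x => x.1 == y)
    let row := "|-\n|" ++ y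
    -- yearbands[b]: b is always a key of the dict, so the default 0 is never used
    let row := bands_in_year.foldl (fun r b => r ++ ("\n|" ++ PySem.Int.toStr (d.getD b 0))) row
    let row := row ++ "\n"
    t ++ row) table
  table ++ "|}"

-- ===== PORT B =====
def make_user_table_by_year_alt (yearbands : List (String × String × Int)) (title : String) : String :=
  let d : PySem.Dict (String × String) Int :=
    PySem.Dict.ofList (yearbands.map (fun p => ((p.1, p.2.1), p.2.2)))
  let groups : PySem.Dict String (List Int) :=
    (PySem.List.sorted2 d.keys (fun k => k.1) (fun k => k.2)).foldl
      (fun g k => g.modify k.1 [] (fun v => v ++ [d.getD k 0])) PySem.Dict.empty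
  let body := PySem.Str.join "" (groups.items.map (fun p =>
    "|-\n|" ++ p.1 ++ PySem.Str.join "" (p.2.map (fun c => "\n|" ++ PySem.Int.toStr c)) ++ "\n"))
  "{|class=wikitable"
    ++ ("\n|+" ++ title)
    ++ "\n|Year\n|1-9 edits\n|10-99 edits\n|100-999 edits\n|1,000-9,999 edits\n|10,000+ edits\n"
    ++ body ++ "|}"

-- ===== PRECONDITION & SPEC =====
def Spec_make_user_table_by_year (yearbands : List (String × String × Int)) (title : String) (out : String) : Prop := out = make_user_table_by_year_alt yearbands title
instance (yearbands : List (String × String × Int)) (title : String) (out : String) : Decidable (Spec_make_user_table_by_year yearbands title out) := by unfold Spec_make_user_table_by_year; infer_instance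

-- ===== CLAIM (what is proved, stated in full; the proofs are below) =====
def Claim_equal_make_user_table_by_year : Prop := ∀ (yearbands : List (String × String × Int)) (title : String), Dom_make_user_table_by_year yearbands title → Spec_make_user_table_by_year yearbands title (make_user_table_by_year yearbands title)

-- ===== LEMMAS AND PROOFS =====

-- String append is associative (proved on the character lists).
theorem pv_str_assoc (a b c : String) : a ++ b ++ c = a ++ (b ++ c) := by
  rw [← String.toList_inj]; simp

-- "".join on characters is flatten.
theorem pv_charsjoin_nil (parts : List (List Char)) :
    PySem.Chars.join [] parts = parts.flatten := by
  induction parts with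
  | nil => rfl
  | cons x t ih =>
    cases t with
    | nil => simp [PySem.Chars.join, List.intercalate, List.intersperse]
    | cons y s =>
      simp only [PySem.Chars.join, List.intercalate, List.intersperse] at *
      simp [ih]

theorem pv_join_nil_cons (s : String) (parts : List String) :
    PySem.Str.join "" (s :: parts) = s ++ PySem.Str.join "" parts := by
  rw [← String.toList_inj]
  simp [PySem.Str.toList_join, pv_charsjoin_nil]

theorem pv_join_nil_nil : PySem.Str.join "" ([] : List String) = "" := by
  rw [← String.toList_inj]
  simp [PySem.Str.toList_join]

-- a Python loop 'acc += g(x)' over strings is "".join(map(g, l)) appended.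
theorem pv_foldl_string_append {α : Type} (g : α → String) (l : List α) (a : String) :
    l.foldl (fun acc x => acc ++ g x) a = a ++ PySem.Str.join "" (l.map g) := by
  induction l generalizing a with
  | nil => simp [pv_join_nil_nil]
  | cons x t ih =>
    simp only [List.foldl_cons, List.map_cons, ih, pv_join_nil_cons]
    rw [pv_str_assoc]

-- insertBy with a comparator that respects k1 preserves sortedness by k1.
theorem pv_insertBy_pairwise {α κ : Type} [LinearOrder κ] (k1 : α → κ)
    (before : α → α → Bool)
    (h1 : ∀ a b, before a b = true → k1 a ≤ k1 b)
    (h2 : ∀ a b, before a b = false → k1 b ≤ k1 a)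
    (x : α) (acc : List α) (hacc : acc.Pairwise (fun a b => k1 a ≤ k1 b)) :
    (PySem.List.insertBy before x acc).Pairwise (fun a b => k1 a ≤ k1 b) := by
  induction acc with
  | nil => simp [PySem.List.insertBy]
  | cons y ys ih =>
    rcases List.pairwise_cons.mp hacc with ⟨hy, hys⟩
    by_cases hb : before x y = true
    · simp only [PySem.List.insertBy, hb, if_true]
      refine List.pairwise_cons.mpr ⟨?_, hacc⟩
      intro z hz
      rcases List.mem_cons.mp hz with hz | hz
      · rw [hz]; exact h1 x y hb
      · exact le_trans (h1 x y hb) (hy z hz)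
    · simp only [PySem.List.insertBy, hb]
      refine List.pairwise_cons.mpr ⟨?_, ih hys⟩
      intro z hz
      rcases (PySem.List.mem_insertBy _ _ _ _).mp hz with hz | hz
      · rw [hz]; exact h2 x y (by simpa using hb)
      · exact hy z hz

theorem pv_foldl_insertBy_pairwise {α κ : Type} [LinearOrder κ] (k1 : α → κ)
    (before : α → α → Bool)
    (h1 : ∀ a b, before a b = true → k1 a ≤ k1 b)
    (h2 : ∀ a b, before a b = false → k1 b ≤ k1 a)
    (l : List α) : ∀ (acc : List α), acc.Pairwise (fun a b => k1 a ≤ k1 b) →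
    (l.foldl (fun acc x => PySem.List.insertBy before x acc) acc).Pairwise (fun a b => k1 a ≤ k1 b) := by
  induction l with
  | nil => intro acc h; simpa using h
  | cons x t ih =>
    intro acc h
    exact ih _ (pv_insertBy_pairwise k1 before h1 h2 x acc h)

-- sorted2 is sorted (weakly) by its first key.
theorem pv_sorted2_fst_pairwise {α κ₁ κ₂ : Type} [LinearOrder κ₁] [LinearOrder κ₂]
    (xs : List α) (k1 : α → κ₁) (k2 : α → κ₂) :
    (PySem.List.sorted2 xs k1 k2).Pairwise (fun a b => k1 a ≤ k1 b) := by
  have h := pv_foldl_insertBy_pairwise k1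
      (fun a b => decide (k1 a < k1 b) || (!decide (k1 b < k1 a) && decide (k2 a < k2 b)))
      (by intro a b hb
          simp at hb
          rcases hb with hb | ⟨hb, _⟩
          · exact le_of_lt hb
          · exact hb)
      (by intro a b hb
          simp at hb
          exact hb.1)
      xs [] (by simp)
  simpa [PySem.List.sorted2] using h

-- building a set is a sublist of the accumulator plus the source list
theorem pv_foldl_set_add_sublist {α : Type} [BEq α] (l : List α) :
    ∀ (acc : List α), (l.foldl PySem.Set.add acc).Sublist (acc ++ l) := by
  induction l with
  | nil => intro acc; simp
  | cons x t ih =>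
    intro acc
    refine (ih (PySem.Set.add acc x)).trans ?_
    unfold PySem.Set.add
    split_ifs with h
    · exact (List.append_sublist_append_left _).mpr (List.sublist_cons_self x t)
    · simp

theorem pv_ofList_sublist {α : Type} [BEq α] (l : List α) :
    (PySem.Set.ofList l).Sublist l := by
  simpa [PySem.Set.ofList, PySem.Set.empty] using pv_foldl_set_add_sublist l []

theorem pv_main (d : PySem.Dict (String × String) Int) (title : String) :
    ((PySem.List.sorted (PySem.Set.ofList ((PySem.List.sorted2 d.keys (fun k => k.1) (fun k => k.2)).map (fun x => x.1))) (fun x => x)).foldl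
        (fun t y => t ++ (((PySem.List.sorted2 d.keys (fun k => k.1) (fun k => k.2)).filter (fun x => x.1 == y)).foldl
            (fun r b => r ++ ("\n|" ++ PySem.Int.toStr (d.getD b 0))) ("|-\n|" ++ y) ++ "\n"))
        ("{|class=wikitable" ++ ("\n|+" ++ title ++ "\n|Year\n|1-9 edits\n|10-99 edits\n|100-999 edits\n|1,000-9,999 edits\n|10,000+ edits\n"))) ++ "|}"
    = "{|class=wikitable" ++ ("\n|+" ++ title)
        ++ "\n|Year\n|1-9 edits\n|10-99 edits\n|100-999 edits\n|1,000-9,999 edits\n|10,000+ edits\n"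
        ++ PySem.Str.join "" ((((PySem.List.sorted2 d.keys (fun k => k.1) (fun k => k.2)).foldl
              (fun g k => g.modify k.1 [] (fun v => v ++ [d.getD k 0])) PySem.Dict.empty).items).map (fun p =>
            "|-\n|" ++ p.1 ++ PySem.Str.join "" (p.2.map (fun c => "\n|" ++ PySem.Int.toStr c)) ++ "\n"))
        ++ "|}" := by
  set bands := PySem.List.sorted2 d.keys (fun k => k.1) (fun k => k.2) with hbands
  set S := PySem.Set.ofList (bands.map (fun x => x.1)) with hS
  set groups := bands.foldl (fun g k => g.modify k.1 [] (fun v => v ++ [d.getD k 0])) PySem.Dict.empty with hgroups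
  have h1 : bands.Pairwise (fun a b => a.1 ≤ b.1) := pv_sorted2_fst_pairwise _ _ _
  have h2 : (bands.map (fun x => x.1)).Pairwise (fun a b => a ≤ b) := List.pairwise_map.mpr h1
  have hSp : S.Pairwise (fun a b => a ≤ b) := List.Pairwise.sublist (pv_ofList_sublist _) h2
  have hyears : PySem.List.sorted S (fun x => x) = S :=
    PySem.List.sorted_eq_self_of_pairwise S (fun x => x) hSp
  have hkeys : groups.keys = S := by
    rw [hgroups, PySem.Dict.keys_foldl_modify_key bands (fun k => k.1) []
      (fun _ k => fun v => v ++ [d.getD k 0]) PySem.Dict.empty]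
    rfl
  have hnodup : groups.keys.Nodup := by
    rw [hgroups]
    exact PySem.Dict.nodup_keys_foldl_modify_key _ _ _ _ _ PySem.Dict.nodup_keys_empty
  have hgetD : ∀ y, groups.getD y [] = (bands.filter (fun k => k.1 == y)).map (fun k => d.getD k 0) := by
    intro y
    have hm : groups = (bands.map (fun k => ((k.1 : String), d.getD k 0))).foldl
        (fun g p => g.modify p.1 [] (fun v => v ++ [p.2])) PySem.Dict.empty := by
      rw [hgroups, List.foldl_map]
    rw [hm, PySem.Dict.getD_foldl_modify_append]
    simp [List.filter_map, Function.comp_def, List.map_map]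
  have hitems : groups.items = S.map (fun y => (y, (bands.filter (fun k => k.1 == y)).map (fun k => d.getD k 0))) := by
    rw [PySem.Dict.items_eq_map_keys groups hnodup [], hkeys]
    exact List.map_congr_left (fun y _ => by rw [hgetD])
  rw [hyears, hitems]
  simp only [pv_foldl_string_append, List.map_map, Function.comp_def, pv_str_assoc]

-- ===== VERDICT (by name: the statement is the Claim_ definition above) =====
theorem make_user_table_by_year_spec : Claim_equal_make_user_table_by_year := by
  intro yearbands title _
  unfold Spec_make_user_table_by_year
  simp only [make_user_table_by_year, make_user_table_by_year_alt]
  apply pv_main
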